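-- pv_equiv track=rewrite | github.com/pypi-data/pypi-mirror-401 | packages/regscale-cli/regscale_cli-6.29.4.12-py3-none-any.whl/regscale/integrations/commercial/aws/audit_manager_compliance.py | _extract_resource_compliance
-- ===== SOURCE A (Python) =====
-- from typing import Any, Dict, List, Optional
--
-- def _extract_resource_compliance(resources_included: List[Dict[str, Any]]) -> Optional[str]:
--     """
--     Extract compliance status from resourcesIncluded list.
--
--     :param List[Dict[str, Any]] resources_included: List of resources
--     :return: "COMPLIANT", "FAILED", "NOT_APPLICABLE", or None
--     :rtype: Optional[str]
--     """
--     if not resources_included: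
--         return None
--
--     resource_checks = [r.get("complianceCheck") for r in resources_included]
--
--     # Check for any failure values (case-insensitive)
--     failure_values = {"FAILED", "FAIL", "Fail", "NON_COMPLIANT", "Non-compliant"}
--     if any(check in failure_values for check in resource_checks):
--         return "FAILED"
--
--     # Check for any success values (case-insensitive)
--     if any(check in {"COMPLIANT", "PASS", "Pass"} for check in resource_checks):
--         return "COMPLIANT"
--
--     if any(check == "NOT_APPLICABLE" for check in resource_checks):
--         return "NOT_APPLICABLE"
--
--     return None
-- ===== SOURCE B (Python) =====
-- from typing import Any, Dict, List, Optional
--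
-- def _extract_resource_compliance(resources_included: List[Dict[str, Any]]) -> Optional[str]:
--     """Single pass with flags: fail short-circuits, success/NA are remembered."""
--     if not resources_included:
--         return None
--     has_compliant = False
--     has_na = False
--     for r in resources_included:
--         check = r.get("complianceCheck")
--         if check in {"FAILED", "FAIL", "Fail", "NON_COMPLIANT", "Non-compliant"}:
--             return "FAILED"
--         if check in {"COMPLIANT", "PASS", "Pass"}:
--             has_compliant = True
--         elif check == "NOT_APPLICABLE":
--             has_na = True
--     if has_compliant:
--         return "COMPLIANT"
--     if has_na:
--         return "NOT_APPLICABLE"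
--     return None
-- ===== Notes on version B (the rewrite author's own statement) =====
-- stated objective: simpler
-- what changed: Replaces the intermediate checks list plus three separate any() scans with one single pass over the resources that returns FAILED immediately and remembers compliant/NA flags, resolved by priority after the loop.
import Mathlib
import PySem

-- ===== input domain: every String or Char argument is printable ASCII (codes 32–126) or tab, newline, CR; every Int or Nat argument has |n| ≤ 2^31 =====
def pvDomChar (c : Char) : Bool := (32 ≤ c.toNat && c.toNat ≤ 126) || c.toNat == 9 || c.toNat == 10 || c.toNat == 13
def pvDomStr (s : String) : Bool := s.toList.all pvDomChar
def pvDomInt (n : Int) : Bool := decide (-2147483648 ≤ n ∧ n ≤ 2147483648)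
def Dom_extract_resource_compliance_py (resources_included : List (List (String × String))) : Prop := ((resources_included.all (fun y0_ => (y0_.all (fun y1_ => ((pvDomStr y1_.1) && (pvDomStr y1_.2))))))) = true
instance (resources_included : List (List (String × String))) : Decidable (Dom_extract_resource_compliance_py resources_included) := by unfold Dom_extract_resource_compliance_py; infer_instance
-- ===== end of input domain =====

-- B replaces A's pre-built checks list and three any() scans with one single pass with
-- flags and an early FAILED exit (objective: simpler decomposition, same O(n) cost).

-- ===== PORT A =====
-- r.get("complianceCheck"): first-match lookup in the association list (= Python dict get)
def pvGetCheck (r : List (String × String)) : Option String :=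
  (PySem.Dict.mk r).get? "complianceCheck"

def extract_resource_compliance_py (resources_included : List (List (String × String))) : Option String :=
  if resources_included.isEmpty then none
  else
    let resource_checks := resources_included.map pvGetCheck
    if resource_checks.any (fun c => c == some "FAILED" || c == some "FAIL" || c == some "Fail"
        || c == some "NON_COMPLIANT" || c == some "Non-compliant") then some "FAILED"
    else if resource_checks.any (fun c => c == some "COMPLIANT" || c == some "PASS" || c == some "Pass") then some "COMPLIANT"
    else if resource_checks.any (fun c => c == some "NOT_APPLICABLE") then some "NOT_APPLICABLE"
    else none

-- ===== PORT B =====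
-- the for-loop of Source B: early return on failure, flags threaded through the recursion
def pvScanB (rs : List (List (String × String))) (has_compliant has_na : Bool) : Option String :=
  match rs with
  | [] =>
    if has_compliant then some "COMPLIANT"
    else if has_na then some "NOT_APPLICABLE"
    else none
  | r :: rest =>
    let check := pvGetCheck r
    if check == some "FAILED" || check == some "FAIL" || check == some "Fail"
        || check == some "NON_COMPLIANT" || check == some "Non-compliant" then some "FAILED"
    else if check == some "COMPLIANT" || check == some "PASS" || check == some "Pass" then
      pvScanB rest true has_na
    else if check == some "NOT_APPLICABLE" then pvScanB rest has_compliant true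
    else pvScanB rest has_compliant has_na

def extract_resource_compliance_py_alt (resources_included : List (List (String × String))) : Option String :=
  if resources_included.isEmpty then none
  else pvScanB resources_included false false

-- ===== PRECONDITION & SPEC =====
def Spec_extract_resource_compliance_py (resources_included : List (List (String × String))) (out : Option String) : Prop := out = extract_resource_compliance_py_alt resources_included
instance (resources_included : List (List (String × String))) (out : Option String) : Decidable (Spec_extract_resource_compliance_py resources_included out) := by unfold Spec_extract_resource_compliance_py; infer_instance

-- ===== CLAIM (what is proved, stated in full; the proofs are below) =====
def Claim_equal_extract_resource_compliance_py : Prop := ∀ (resources_included : List (List (String × String))), Dom_extract_resource_compliance_py resources_included → Spec_extract_resource_compliance_py resources_included (extract_resource_compliance_py resources_included)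

-- ===== LEMMAS AND PROOFS =====

-- characterisation of B's loop: failure scan first, then the flags merged with the remaining scans
theorem pvScanB_eq (rs : List (List (String × String))) (hc hn : Bool) :
    pvScanB rs hc hn =
      if rs.any (fun r => pvGetCheck r == some "FAILED" || pvGetCheck r == some "FAIL"
          || pvGetCheck r == some "Fail" || pvGetCheck r == some "NON_COMPLIANT"
          || pvGetCheck r == some "Non-compliant") then some "FAILED"
      else if hc || rs.any (fun r => pvGetCheck r == some "COMPLIANT" || pvGetCheck r == some "PASS"
          || pvGetCheck r == some "Pass") then some "COMPLIANT"
      else if hn || rs.any (fun r => pvGetCheck r == some "NOT_APPLICABLE") then some "NOT_APPLICABLE"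
      else none := by
  induction rs generalizing hc hn with
  | nil => simp [pvScanB]
  | cons r rest ih =>
    simp only [pvScanB, List.any_cons]
    by_cases h1 : (pvGetCheck r == some "FAILED" || pvGetCheck r == some "FAIL"
        || pvGetCheck r == some "Fail" || pvGetCheck r == some "NON_COMPLIANT"
        || pvGetCheck r == some "Non-compliant") = true
    · simp [h1]
    · by_cases h2 : (pvGetCheck r == some "COMPLIANT" || pvGetCheck r == some "PASS"
          || pvGetCheck r == some "Pass") = true
      · simp [h1, h2, ih]
      · by_cases h3 : (pvGetCheck r == some "NOT_APPLICABLE") = true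
        · simp [h1, h2, h3, ih]
        · simp [h1, h2, h3, ih]

-- ===== VERDICT (by name: the statement is the Claim_ definition above) =====
theorem extract_resource_compliance_py_spec : Claim_equal_extract_resource_compliance_py := by
  intro rs _
  unfold Spec_extract_resource_compliance_py extract_resource_compliance_py extract_resource_compliance_py_alt
  by_cases he : rs.isEmpty
  · simp [he]
  · simp [he, pvScanB_eq, List.any_map, Function.comp_def]
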